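-- pv_equiv track=rewrite | github.com/aditissigh24/raasta-ai-backend | onboarding_agent/nodes/present_scenarios.py | _match_scenario
-- ===== SOURCE A (Python) =====
-- from typing import Optional
--
-- def _match_scenario(scenarios: list, user_message: str) -> Optional[dict]:
--     """
--     Match the user's message to a scenario.
--
--     Matching order:
--     1. Exact scenario_id / id match (chip sends id directly)
--     2. Case-insensitive title match
--     3. Partial title match
--     """
--     if not user_message or not scenarios:
--         return None
--
--     msg = user_message.strip().lower()
--
--     for sc in scenarios:
--         sc_id = str(sc.get("scenario_id", sc.get("id", ""))).lower()
--         if sc_id == msg: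
--             return sc
--
--     for sc in scenarios:
--         title = sc.get("scenario_title", sc.get("title", "")).lower()
--         if title == msg:
--             return sc
--
--     for sc in scenarios:
--         title = sc.get("scenario_title", sc.get("title", "")).lower()
--         if msg in title or title in msg:
--             return sc
--
--     return None
-- ===== SOURCE B (Python) =====
-- from typing import Optional
--
-- def _match_scenario(scenarios: list, user_message: str) -> Optional[dict]:
--     """Single pass over scenarios keeping the first match in each category."""
--     if not user_message or not scenarios:
--         return None
--
--     msg = user_message.strip().lower()
--
--     id_match = title_match = partial_match = None
--     for sc in scenarios:
--         sc_id = str(sc.get("scenario_id", sc.get("id", ""))).lower()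
--         title = sc.get("scenario_title", sc.get("title", "")).lower()
--         if id_match is None and sc_id == msg:
--             id_match = sc
--         if title_match is None and title == msg:
--             title_match = sc
--         if partial_match is None and (msg in title or title in msg):
--             partial_match = sc
--
--     if id_match is not None:
--         return id_match
--     if title_match is not None:
--         return title_match
--     return partial_match
-- ===== Notes on version B (the rewrite author's own statement) =====
-- stated objective: simpler
-- what changed: Replaces A's three sequential scans of the scenario list by a single pass carrying three first-match slots (id, exact title, partial title), resolved by priority after the loop.
import Mathlib
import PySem

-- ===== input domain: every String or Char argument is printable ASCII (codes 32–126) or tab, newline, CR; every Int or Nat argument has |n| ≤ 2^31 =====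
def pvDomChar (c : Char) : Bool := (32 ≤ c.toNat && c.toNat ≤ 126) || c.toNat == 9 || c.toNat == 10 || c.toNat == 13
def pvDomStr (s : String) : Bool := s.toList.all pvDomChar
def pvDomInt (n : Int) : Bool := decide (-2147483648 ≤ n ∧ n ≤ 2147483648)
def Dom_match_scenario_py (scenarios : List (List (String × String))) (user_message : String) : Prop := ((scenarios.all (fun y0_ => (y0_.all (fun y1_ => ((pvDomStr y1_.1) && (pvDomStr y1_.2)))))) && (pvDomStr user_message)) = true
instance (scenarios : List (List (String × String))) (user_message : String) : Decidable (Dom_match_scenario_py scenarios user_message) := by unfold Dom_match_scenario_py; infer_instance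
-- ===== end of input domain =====

-- B replaces A's three sequential scans by one pass carrying three first-match slots; objective: simpler.

-- ===== PORT A =====
-- sc.get(k, dflt) on the association list (first match)
def pvDictGet (sc : List (String × String)) (k : String) (dflt : String) : String :=
  match sc.find? (fun p => p.1 == k) with
  | some p => p.2
  | none => dflt

-- str(sc.get("scenario_id", sc.get("id", ""))).lower()  (values are strings, str() is identity)
def pvScId (sc : List (String × String)) : String :=
  PySem.Str.lower (pvDictGet sc "scenario_id" (pvDictGet sc "id" ""))

-- sc.get("scenario_title", sc.get("title", "")).lower()
def pvTitle (sc : List (String × String)) : String :=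
  PySem.Str.lower (pvDictGet sc "scenario_title" (pvDictGet sc "title" ""))

def match_scenario_py (scenarios : List (List (String × String))) (user_message : String) : Option (List (String × String)) :=
  if user_message == "" || scenarios.isEmpty then none
  else
    let msg := PySem.Str.lower (PySem.Str.strip user_message)
    -- first loop: exact id match
    match scenarios.find? (fun sc => pvScId sc == msg) with
    | some sc => some sc
    | none =>
      -- second loop: exact title match
      match scenarios.find? (fun sc => pvTitle sc == msg) with
      | some sc => some sc
      | none =>
        -- third loop: partial title match
        match scenarios.find? (fun sc => PySem.Str.isIn msg (pvTitle sc) || PySem.Str.isIn (pvTitle sc) msg) with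
        | some sc => some sc
        | none => none

-- ===== PORT B =====
-- the single pass: each slot is set only the first time its condition holds
def pvLoopB (msg : String) :
    List (List (String × String)) →
    Option (List (String × String)) × Option (List (String × String)) × Option (List (String × String)) →
    Option (List (String × String)) × Option (List (String × String)) × Option (List (String × String))
  | [], st => st
  | sc :: rest, (idm, tm, pm) =>
      pvLoopB msg rest
        (if idm.isNone && (pvScId sc == msg) then some sc else idm,
         if tm.isNone && (pvTitle sc == msg) then some sc else tm,
         if pm.isNone && (PySem.Str.isIn msg (pvTitle sc) || PySem.Str.isIn (pvTitle sc) msg) then some sc else pm)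

def match_scenario_py_alt (scenarios : List (List (String × String))) (user_message : String) : Option (List (String × String)) :=
  if user_message == "" || scenarios.isEmpty then none
  else
    let msg := PySem.Str.lower (PySem.Str.strip user_message)
    match pvLoopB msg scenarios (none, none, none) with
    | (some sc, _, _) => some sc
    | (none, some sc, _) => some sc
    | (none, none, pm) => pm

-- ===== PRECONDITION & SPEC =====
def Spec_match_scenario_py (scenarios : List (List (String × String))) (user_message : String) (out : Option (List (String × String))) : Prop := out = match_scenario_py_alt scenarios user_message
instance (scenarios : List (List (String × String))) (user_message : String) (out : Option (List (String × String))) : Decidable (Spec_match_scenario_py scenarios user_message out) := by unfold Spec_match_scenario_py; infer_instance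

-- ===== CLAIM (what is proved, stated in full; the proofs are below) =====
def Claim_equal_match_scenario_py : Prop := ∀ (scenarios : List (List (String × String))) (user_message : String), Dom_match_scenario_py scenarios user_message → Spec_match_scenario_py scenarios user_message (match_scenario_py scenarios user_message)

-- ===== LEMMAS AND PROOFS =====

-- the loop's slots are the original options, or (when none) the first elements satisfying each predicate
theorem pvLoopB_eq (msg : String) (l : List (List (String × String)))
    (a b c : Option (List (String × String))) :
    pvLoopB msg l (a, b, c) =
      (a.or (l.find? (fun sc => pvScId sc == msg)),
       b.or (l.find? (fun sc => pvTitle sc == msg)),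
       c.or (l.find? (fun sc => PySem.Str.isIn msg (pvTitle sc) || PySem.Str.isIn (pvTitle sc) msg))) := by
  induction l generalizing a b c with
  | nil => simp [pvLoopB]
  | cons sc rest ih =>
      simp only [pvLoopB, ih, List.find?]
      cases h1 : (pvScId sc == msg) <;>
      cases h2 : (pvTitle sc == msg) <;>
      cases h3 : (PySem.Str.isIn msg (pvTitle sc) || PySem.Str.isIn (pvTitle sc) msg) <;>
      cases a <;> cases b <;> cases c <;>
      simp [Option.or]

-- ===== VERDICT (by name: the statement is the Claim_ definition above) =====
theorem match_scenario_py_spec : Claim_equal_match_scenario_py := by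
  intro scenarios user_message _
  unfold Spec_match_scenario_py match_scenario_py match_scenario_py_alt
  by_cases hg : (user_message == "" || scenarios.isEmpty) = true
  · simp [hg]
  · simp only [hg, Bool.false_eq_true, if_false]
    rw [pvLoopB_eq]
    simp only [Option.or]
    cases scenarios.find? (fun sc => pvScId sc == PySem.Str.lower (PySem.Str.strip user_message)) <;>
    cases scenarios.find? (fun sc => pvTitle sc == PySem.Str.lower (PySem.Str.strip user_message)) <;>
    first
      | rfl
      | (cases List.find? (fun sc => PySem.Str.isIn (PySem.Str.lower (PySem.Str.strip user_message)) (pvTitle sc) || PySem.Str.isIn (pvTitle sc) (PySem.Str.lower (PySem.Str.strip user_message))) scenarios <;> rfl)
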